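-- pv_equiv track=rewrite | github.com/ankursharma-iitd/Ideology-Detection | ER/graphER/fuzzy_subset.py | sortAbbr
-- ===== SOURCE A (Python) =====
-- def sortAbbr(string):
--     s_l=string.split(' ')
--     sorted_name_l=sorted(s_l)
--     initials_l=[]
--     for item in s_l:
--         initials_l.append(item[0])
--     sorted_initials_l=sorted(initials_l)
--     return sorted_name_l,sorted_initials_l
-- ===== SOURCE B (Python) =====
-- def sortAbbr(string):
--     sorted_name_l = sorted(string.split(' '))
--     return sorted_name_l, [w[0] for w in sorted_name_l]
-- ===== Notes on version B (the rewrite author's own statement) =====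
-- stated objective: simpler
-- what changed: B sorts the word list once and reads the initials off the sorted words (first characters of a lexicographically sorted list are already sorted), eliminating the second sort and the explicit append loop.
import Mathlib
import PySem

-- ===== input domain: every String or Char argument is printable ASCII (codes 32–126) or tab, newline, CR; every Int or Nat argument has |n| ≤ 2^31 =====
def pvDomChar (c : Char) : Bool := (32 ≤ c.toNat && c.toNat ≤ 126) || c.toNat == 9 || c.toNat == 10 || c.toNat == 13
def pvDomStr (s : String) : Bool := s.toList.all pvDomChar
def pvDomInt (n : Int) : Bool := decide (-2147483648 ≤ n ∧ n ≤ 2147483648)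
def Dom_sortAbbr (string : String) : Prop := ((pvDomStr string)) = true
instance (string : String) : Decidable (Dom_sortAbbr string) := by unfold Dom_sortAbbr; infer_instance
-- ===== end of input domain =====

-- B sorts the word list once and reads the initials off the sorted words; simpler (one sort instead of two).


-- ===== PORT A =====
-- item[0] on a Python str yields a 1-char str: Str.pyGet? gives the Char, wrapped back into a String.
def pvFirst (w : String) : String :=
  ((PySem.Str.pyGet? w 0).map (fun c => String.ofList [c])).getD ""

def sortAbbr (string : String) : List String × List String :=
  let s_l := ((PySem.Str.split? string " ").getD [])
  let sorted_name_l := PySem.List.sorted s_l (fun x => x) false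
  let initials_l := s_l.foldl (fun acc item => acc ++ [pvFirst item]) []
  let sorted_initials_l := PySem.List.sorted initials_l (fun x => x) false
  (sorted_name_l, sorted_initials_l)

-- ===== PORT B =====
def sortAbbr_alt (string : String) : List String × List String :=
  let sorted_name_l := PySem.List.sorted (((PySem.Str.split? string " ").getD [])) (fun x => x) false
  (sorted_name_l, sorted_name_l.map pvFirst)

-- ===== PRECONDITION & SPEC =====
-- Pre_ excludes exactly the inputs where some token of string.split(' ') is empty
-- (leading/trailing/adjacent spaces or the empty string): there item[0] raises IndexError in A (and in B).
def Pre_sortAbbr (string : String) : Prop :=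
  ∀ w ∈ ((PySem.Str.split? string " ").getD []), w ≠ ""
instance (string : String) : Decidable (Pre_sortAbbr string) := by unfold Pre_sortAbbr; infer_instance
def pvWitness_sortAbbr : String := "hello brave world"

def Spec_sortAbbr (string : String) (out : List String × List String) : Prop := out = sortAbbr_alt string
instance (string : String) (out : List String × List String) : Decidable (Spec_sortAbbr string out) := by unfold Spec_sortAbbr; infer_instance

-- ===== CLAIM (what is proved, stated in full; the proofs are below) =====
def Claim_equal_sortAbbr : Prop := ∀ (string : String), Dom_sortAbbr string → Pre_sortAbbr string → Spec_sortAbbr string (sortAbbr string)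

-- ===== LEMMAS AND PROOFS =====

-- a one-element list compares below another iff its elements do
lemma pv_singleton_lt (c d : Char) (h : c < d) : ([c] : List Char) < [d] := by
  show List.Lex _ _ _
  exact List.Lex.rel h

-- first characters are monotone: x ≤ y on nonempty strings gives pvFirst x ≤ pvFirst y
lemma pvFirst_mono (x y : String) (hx : x ≠ "") (hy : y ≠ "") (h : x ≤ y) :
    pvFirst x ≤ pvFirst y := by
  unfold pvFirst
  rw [String.le_iff_toList_le] at h
  have hx' : x.toList ≠ [] := by
    intro e
    have := String.ofList_toList (s := x)
    rw [e] at this; exact hx this.symm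
  have hy' : y.toList ≠ [] := by
    intro e
    have := String.ofList_toList (s := y)
    rw [e] at this; exact hy this.symm
  obtain ⟨c, t, hct⟩ := List.exists_cons_of_ne_nil hx'
  obtain ⟨d, u, hdu⟩ := List.exists_cons_of_ne_nil hy'
  have hcd : c ≤ d := by
    rw [hct, hdu] at h
    rcases lt_or_eq_of_le h with h|h
    · exact List.head_le_of_lt h
    · exact le_of_eq (List.cons.inj h).1
  have hx0 : PySem.Str.pyGet? x 0 = some c := by simp [hct]
  have hy0 : PySem.Str.pyGet? y 0 = some d := by simp [hdu]
  rw [hx0, hy0]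
  simp only [Option.map_some, Option.getD_some]
  rw [String.le_iff_toList_le]
  simp only [String.toList_ofList]
  rcases lt_or_eq_of_le hcd with h|h
  · exact le_of_lt (pv_singleton_lt c d h)
  · subst h; exact le_refl _

lemma pv_sorted_initials (l : List String) (hne : ∀ w ∈ l, w ≠ "") :
    PySem.List.sorted (l.map pvFirst) (fun x => x) false
      = (PySem.List.sorted l (fun x => x) false).map pvFirst := by
  apply PySem.List.sorted_id_eq_of_perm_of_pairwise
  · exact ((PySem.List.sorted_perm l (fun x => x) false).map pvFirst)
  · have hp : (PySem.List.sorted l (fun x => x) false).Pairwise (· ≤ ·) :=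
      PySem.List.sorted_pairwise l (fun x => x)
    have hp' : (PySem.List.sorted l (fun x => x) false).Pairwise
        (fun a b => pvFirst a ≤ pvFirst b) := by
      refine List.Pairwise.imp_of_mem ?_ hp
      intro a b ha hb hab
      have ha' : a ∈ l := (PySem.List.mem_sorted _ _ _ a).mp ha
      have hb' : b ∈ l := (PySem.List.mem_sorted _ _ _ b).mp hb
      exact pvFirst_mono a b (hne a ha') (hne b hb') hab
    exact List.pairwise_map.mpr hp'

-- ===== VERDICT (by name: the statement is the Claim_ definition above) =====
theorem sortAbbr_spec : Claim_equal_sortAbbr := by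
  intro string _hdom hpre
  unfold Spec_sortAbbr sortAbbr sortAbbr_alt
  simp only [PySem.List.foldl_append_singleton_eq_map, List.nil_append]
  exact congrArg _ (pv_sorted_initials _ hpre)
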